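-- pv_equiv track=rewrite | github.com/AffineFoundation/affine | scripts/prune_hotkeys.py | scale_records
-- ===== SOURCE A (Python) =====
-- import copy
-- from itertools import islice
-- from typing import Iterable, List, Sequence, Set, Tuple
--
-- def scale_records(records: List[dict], target: int) -> List[dict]:
--     if target <= 0:
--         raise SystemExit("--target-count must be positive")
--     if not records:
--         raise SystemExit("No records remain after filtering; cannot scale")
--     if len(records) == target:
--         return records
--     if len(records) > target:
--         return [copy.deepcopy(rec) for rec in islice(records, target)]
--
--     result: List[dict] = []
--     idx = 0
--     while len(result) < target:
--         result.append(copy.deepcopy(records[idx % len(records)]))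
--         idx += 1
--     return result
-- ===== SOURCE B (Python) =====
-- import copy
--
-- def scale_records(records, target):
--     if target <= 0:
--         raise SystemExit("--target-count must be positive")
--     if not records:
--         raise SystemExit("No records remain after filtering; cannot scale")
--     if len(records) == target:
--         return records
--     q, r = divmod(target, len(records))
--     return [copy.deepcopy(rec) for rec in records * q + records[:r]]
-- ===== Notes on version B (the rewrite author's own statement) =====
-- stated objective: simpler
-- what changed: Replaces A's >target/<target branching (an islice truncation plus a modular-index while loop) with a single divmod decomposition: q full repeats of the list plus the first r elements cover both truncation and up-scaling.
import Mathlib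
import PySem

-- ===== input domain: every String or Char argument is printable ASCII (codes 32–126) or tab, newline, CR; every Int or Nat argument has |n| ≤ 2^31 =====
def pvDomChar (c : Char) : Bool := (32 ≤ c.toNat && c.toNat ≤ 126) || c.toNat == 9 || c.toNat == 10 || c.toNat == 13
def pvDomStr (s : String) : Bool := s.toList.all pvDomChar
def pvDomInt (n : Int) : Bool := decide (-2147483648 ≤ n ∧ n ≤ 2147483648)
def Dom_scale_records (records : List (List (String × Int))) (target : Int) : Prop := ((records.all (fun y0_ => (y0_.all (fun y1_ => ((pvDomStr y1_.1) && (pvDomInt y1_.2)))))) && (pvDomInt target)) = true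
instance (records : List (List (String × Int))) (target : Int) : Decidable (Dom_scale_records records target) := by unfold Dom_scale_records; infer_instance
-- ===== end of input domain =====

-- B replaces A's >target/<target branching (islice truncation + modular-index while loop)
-- by a single divmod decomposition: q full copies of the list plus its first r elements (objective: simpler).
-- copy.deepcopy is the identity on these immutable-valued records, so both ports drop it;
-- the equal-length case returns `records` itself in both programs.

-- ===== PORT A =====
-- the while loop: append records[idx % len(records)] (deepcopy = identity on values) until len(result) = target
def scaleLoop (records : List (List (String × Int))) (target : Int)
    (result : List (List (String × Int))) (idx : Int) : List (List (String × Int)) :=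
  if (result.length : Int) < target then
    scaleLoop records target
      (result ++ [PySem.List.pyGetD records (PySem.Int.mod idx (records.length : Int)) []]) (idx + 1)
  else result
termination_by (target - (result.length : Int)).toNat
decreasing_by simp only [List.length_append, List.length_cons, List.length_nil]; omega

-- the raising guards (target ≤ 0, empty records) are excluded by Pre_scale_records
def scale_records (records : List (List (String × Int))) (target : Int) : List (List (String × Int)) :=
  if (records.length : Int) = target then records
  else if (records.length : Int) > target then
    -- [deepcopy(rec) for rec in islice(records, target)]
    records.take target.toNat
  else scaleLoop records target [] 0

-- ===== PORT B =====
def scale_records_alt (records : List (List (String × Int))) (target : Int) : List (List (String × Int)) :=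
  if (records.length : Int) = target then records
  else
    -- q, r = divmod(target, len(records)); [deepcopy(rec) for rec in records * q + records[:r]]
    let q := PySem.Int.floordiv target (records.length : Int)
    let r := PySem.Int.mod target (records.length : Int)
    (List.replicate q.toNat records).flatten ++ PySem.List.slice records none (some r)

-- ===== PRECONDITION & SPEC =====
-- Pre_ excludes exactly the inputs where A raises SystemExit: non-positive target and empty records.
def Pre_scale_records (records : List (List (String × Int))) (target : Int) : Prop :=
  0 < target ∧ records ≠ []
instance (records : List (List (String × Int))) (target : Int) : Decidable (Pre_scale_records records target) := by unfold Pre_scale_records; infer_instance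

def pvWitness_scale_records : (List (List (String × Int))) × Int := ([[("a", 1)]], 2)

def Spec_scale_records (records : List (List (String × Int))) (target : Int) (out : List (List (String × Int))) : Prop := out = scale_records_alt records target
instance (records : List (List (String × Int))) (target : Int) (out : List (List (String × Int))) : Decidable (Spec_scale_records records target out) := by unfold Spec_scale_records; infer_instance

-- ===== CLAIM (what is proved, stated in full; the proofs are below) =====
def Claim_equal_scale_records : Prop := ∀ (records : List (List (String × Int))) (target : Int), Dom_scale_records records target → Pre_scale_records records target → Spec_scale_records records target (scale_records records target)

-- ===== LEMMAS AND PROOFS =====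

-- the while loop produces result ++ the next k elements of the cycle starting at idx
theorem scaleLoop_eq (records : List (List (String × Int))) (target : Int)
    (k : ℕ) (result : List (List (String × Int))) (idx : ℕ)
    (hk : (target - (result.length : Int)).toNat = k) :
    scaleLoop records target result (idx : Int)
      = result ++ (List.range k).map (fun j => records.getD ((idx + j) % records.length) []) := by
  induction k generalizing result idx with
  | zero =>
      rw [scaleLoop]
      simp only [List.range_zero, List.map_nil, List.append_nil]
      rw [if_neg (by omega)]
  | succ k ih =>
      rw [scaleLoop, if_pos (by omega)]
      have hmod : PySem.Int.mod (idx : Int) (records.length : Int)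
          = ((idx % records.length : ℕ) : Int) := PySem.Int.mod_natCast idx records.length
      have hidx : ((idx : Int) + 1) = ((idx + 1 : ℕ) : Int) := by push_cast; ring
      rw [hmod, hidx, ih (result ++ [_]) (idx + 1) (by simp; omega)]
      simp only [PySem.List.pyGetD_natCast, List.append_assoc, List.singleton_append]
      congr 1
      rw [List.range_succ_eq_map]
      simp only [List.map_cons, List.map_map, Nat.add_zero]
      congr 1
      apply List.map_congr_left
      intro j _
      simp only [Function.comp_apply]
      congr 2
      omega

-- the cyclic prefix of length q*L + r is q full copies of the list plus its first r elements
theorem cycle_eq (records : List (List (String × Int))) (_hL : 0 < records.length) :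
    ∀ (q r : ℕ), r ≤ records.length →
      (List.range (q * records.length + r)).map (fun j => records.getD (j % records.length) [])
        = (List.replicate q records).flatten ++ records.take r := by
  have base : ∀ r : ℕ, r ≤ records.length →
      (List.range r).map (fun j => records.getD (j % records.length) []) = records.take r := by
    intro r hr
    apply List.ext_getElem
    · simp; omega
    · intro i h1 h2
      simp only [List.getElem_map, List.getElem_range, List.getElem_take]
      have hi : i < records.length := by simp at h1; omega
      rw [Nat.mod_eq_of_lt hi, List.getD_eq_getElem _ _ hi]
  intro q
  induction q with
  | zero => intro r hr; simpa using base r hr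
  | succ q ih =>
      intro r hr
      have hsplit : (q + 1) * records.length + r = records.length + (q * records.length + r) := by ring
      rw [hsplit, List.range_add, List.map_append, List.map_map]
      have h1 : (List.range records.length).map (fun j => records.getD (j % records.length) [])
          = records := by simpa using base records.length le_rfl
      have h2 : (List.range (q * records.length + r)).map
            ((fun j => records.getD (j % records.length) []) ∘ (fun x => records.length + x))
          = (List.replicate q records).flatten ++ records.take r := by
        rw [← ih r hr]
        apply List.map_congr_left
        intro j _
        simp [Nat.add_mod_left]
      rw [h1, h2, List.replicate_succ, List.flatten_cons, List.append_assoc]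

-- ===== VERDICT (by name: the statement is the Claim_ definition above) =====
theorem scale_records_spec : Claim_equal_scale_records := by
  intro records target _ hpre
  obtain ⟨ht, hne⟩ := hpre
  have hL : 0 < records.length := List.length_pos_iff.mpr hne
  unfold Spec_scale_records scale_records scale_records_alt
  by_cases heq : (records.length : Int) = target
  · simp [heq]
  · rw [if_neg heq, if_neg heq]
    set L : Int := (records.length : Int) with hLdef
    have hfd : PySem.Int.floordiv target L = target / L :=
      PySem.Int.floordiv_eq_ediv_of_pos (by omega)
    have hmd : PySem.Int.mod target L = target % L :=
      PySem.Int.mod_eq_emod_of_pos (by omega)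
    have hr0 : 0 ≤ target % L := Int.emod_nonneg _ (by omega)
    have hrL : target % L < L := Int.emod_lt_of_pos _ (by omega)
    by_cases hgt : L > target
    · -- truncation: q = 0, r = target
      rw [if_pos hgt]
      have hq : target / L = 0 := Int.ediv_eq_zero_of_lt (by omega) hgt
      have hrt : target % L = target := Int.emod_eq_of_lt (by omega) hgt
      simp only [hfd, hmd, hq, hrt]
      rw [PySem.List.slice_to records (by omega)]
      simp
    · -- up-scaling: the while loop equals q full copies ++ first r elements
      rw [if_neg hgt]
      have hloop := scaleLoop_eq records target target.toNat [] 0 (by simp)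
      simp only [List.nil_append, Nat.zero_add, Int.natCast_zero] at hloop
      rw [hloop]
      simp only [hfd, hmd]
      rw [PySem.List.slice_to records hr0]
      set Q : ℕ := (target / L).toNat with hQ
      set R : ℕ := (target % L).toNat with hR
      have hqpos : 0 ≤ target / L := Int.ediv_nonneg (by omega) (by omega)
      have hcast : ((Q * records.length + R : ℕ) : Int) = target := by
        push_cast
        rw [hQ, hR, Int.toNat_of_nonneg hqpos, Int.toNat_of_nonneg hr0]
        have := Int.mul_ediv_add_emod target L
        rw [← hLdef]; linarith
      have htn : target.toNat = Q * records.length + R := by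
        rw [← hcast, Int.toNat_natCast]
      rw [htn]
      exact cycle_eq records hL Q R (by omega)
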